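-- pv_equiv track=rewrite | github.com/Nooorrrr/CTF-AC | crypto/baby_crib/solve.py | looks_like_hex_pair
-- ===== SOURCE A (Python) =====
-- def looks_like_hex_pair(s: str) -> bool:
--     s = s.strip()
--     if ":" not in s:
--         return False
--     a, b = s.split(":", 1)
--     hexchars = set("0123456789abcdefABCDEF")
--     return (len(a) > 0 and len(b) > 0 and
--             all(ch in hexchars for ch in a.strip()) and
--             all(ch in hexchars for ch in b.strip()) and
--             len(a.strip()) % 2 == 0 and len(b.strip()) % 2 == 0)
-- ===== SOURCE B (Python) =====
-- _HEX = "0123456789abcdefABCDEF"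
--
--
-- def _hex_pairs(h: str) -> bool:
--     # h matches (?:[0-9a-fA-F]{2})* : consume two hex digits at a time
--     if h == "":
--         return True
--     if len(h) < 2 or h[0] not in _HEX or h[1] not in _HEX:
--         return False
--     return _hex_pairs(h[2:])
--
--
-- def looks_like_hex_pair(s: str) -> bool:
--     t = s.strip()
--     i = t.find(":")
--     if i <= 0 or i + 1 == len(t):
--         # no separator found, or an empty part on either side of it
--         return False
--     return _hex_pairs(t[:i].strip()) and _hex_pairs(t[i + 1:].strip())
-- ===== Notes on version B (the rewrite author's own statement) =====
-- stated objective: alternative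
-- what changed: B drops the maxsplit-1 split on the colon in favour of find plus slices, and replaces the per-character set-membership scan plus len%2 parity arithmetic on each side with a recursion that consumes two hex digits at a time (matching the hex-digit-pair pattern directly).
import Mathlib
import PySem

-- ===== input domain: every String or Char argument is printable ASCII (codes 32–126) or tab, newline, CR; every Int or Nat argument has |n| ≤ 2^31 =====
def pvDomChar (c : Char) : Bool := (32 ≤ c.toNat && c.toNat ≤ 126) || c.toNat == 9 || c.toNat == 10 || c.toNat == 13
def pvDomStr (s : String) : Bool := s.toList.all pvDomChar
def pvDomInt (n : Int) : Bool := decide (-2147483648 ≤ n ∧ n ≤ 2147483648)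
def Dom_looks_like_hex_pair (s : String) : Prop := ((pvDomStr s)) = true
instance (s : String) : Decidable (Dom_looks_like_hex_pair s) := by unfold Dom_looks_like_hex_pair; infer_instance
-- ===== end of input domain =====

-- B replaces A's maxsplit-1 colon split + per-character set scan + parity arithmetic by find/slices and a
-- two-characters-at-a-time recursion (the "(hexhex)*" pattern); objective: alternative.

-- ===== PORT A =====
def looks_like_hex_pair (s : String) : Bool :=
  let t := PySem.Chars.strip s.toList
  if !(PySem.Chars.isIn [':'] t) then false
  else
    match PySem.Chars.splitOnMax t [':'] 1 with
    | a :: b :: _ =>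
        let hexchars : PySem.Set Char := PySem.Set.ofList "0123456789abcdefABCDEF".toList
        decide (0 < a.length) && decide (0 < b.length) &&
        (PySem.Chars.strip a).all (fun ch => PySem.Set.contains hexchars ch) &&
        (PySem.Chars.strip b).all (fun ch => PySem.Set.contains hexchars ch) &&
        decide ((PySem.Chars.strip a).length % 2 = 0) &&
        decide ((PySem.Chars.strip b).length % 2 = 0)
    | _ => false  -- unreachable: split(":", 1) with ":" present yields exactly two parts

-- ===== PORT B =====
def pvHexChars : List Char := "0123456789abcdefABCDEF".toList

-- _hex_pairs: h matches (?:[0-9a-fA-F]{2})*, consuming two characters at a time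
def hexPairsGo : List Char → Bool
  | [] => true
  | [_] => false
  | c1 :: c2 :: rest =>
      if !(PySem.Chars.isIn [c1] pvHexChars) || !(PySem.Chars.isIn [c2] pvHexChars) then false
      else hexPairsGo rest

def looks_like_hex_pair_alt (s : String) : Bool :=
  let t := PySem.Chars.strip s.toList
  let i := PySem.Chars.find t [':']
  if i ≤ 0 ∨ i + 1 = PySem.Chars.len t then false
  else
    hexPairsGo (PySem.Chars.strip (PySem.Chars.slice t none (some i))) &&
    hexPairsGo (PySem.Chars.strip (PySem.Chars.slice t (some (i + 1)) none))

-- ===== PRECONDITION & SPEC =====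
def Spec_looks_like_hex_pair (s : String) (out : Bool) : Prop := out = looks_like_hex_pair_alt s
instance (s : String) (out : Bool) : Decidable (Spec_looks_like_hex_pair s out) := by unfold Spec_looks_like_hex_pair; infer_instance

-- ===== CLAIM (what is proved, stated in full; the proofs are below) =====
def Claim_equal_looks_like_hex_pair : Prop := ∀ (s : String), Dom_looks_like_hex_pair s → Spec_looks_like_hex_pair s (looks_like_hex_pair s)

-- ===== LEMMAS AND PROOFS =====

theorem findGo_singleton (c : Char) (l : List Char) (k : Nat) :
    PySem.Chars.find.go [c] l k = if c ∈ l then ((k + l.idxOf c : Nat) : Int) else -1 := by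
  induction l generalizing k with
  | nil => simp [PySem.Chars.find.go]
  | cons x t ih =>
    rw [PySem.Chars.find.go.eq_def]
    dsimp only
    by_cases hx : c = x
    · subst hx
      simp [List.isPrefixOf]
    · have hpre : ([c].isPrefixOf (x :: t)) = false := by
        simp [List.isPrefixOf]; exact fun h => absurd h hx
      rw [hpre]
      simp only [Bool.false_eq_true, if_false]
      rw [ih]
      by_cases hct : c ∈ t
      · rw [if_pos hct, if_pos (by simp [hct])]
        rw [List.idxOf_cons, Bool.cond_eq_ite, if_neg (by simp [Ne.symm hx])]
        push_cast
        ring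
      · rw [if_neg hct, if_neg (by simp [hx, hct])]

theorem find_singleton (c : Char) (l : List Char) :
    PySem.Chars.find l [c] = if c ∈ l then (l.idxOf c : Int) else -1 := by
  have := findGo_singleton c l 0
  simpa [PySem.Chars.find] using this

theorem isIn_singleton (c : Char) (l : List Char) :
    PySem.Chars.isIn [c] l = decide (c ∈ l) := by
  rw [PySem.Chars.isIn, find_singleton]
  by_cases hc : c ∈ l
  · rw [if_pos hc]
    simp only [hc, decide_true]
    exact bne_iff_ne.mpr (by omega)
  · rw [if_neg hc]
    simp [hc]

theorem splitGo_m0 (sep : List Char) (fuel : Nat) (l cur : List Char) (acc : List (List Char)) :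
    PySem.Chars.splitOnMax.go sep fuel 0 l cur acc = ((cur.reverse ++ l) :: acc).reverse := by
  cases fuel with
  | zero => simp [PySem.Chars.splitOnMax.go]
  | succ f =>
    cases l with
    | nil => simp [PySem.Chars.splitOnMax.go]
    | cons x t => simp [PySem.Chars.splitOnMax.go]

theorem splitGo_one (c : Char) (fuel : Nat) :
    ∀ (l cur : List Char) (acc : List (List Char)), l.length < fuel →
    PySem.Chars.splitOnMax.go [c] fuel 1 l cur acc =
      if c ∈ l then acc.reverse ++ [cur.reverse ++ l.take (l.idxOf c), l.drop (l.idxOf c + 1)]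
      else acc.reverse ++ [cur.reverse ++ l] := by
  induction fuel with
  | zero => intro l cur acc h; omega
  | succ f ih =>
    intro l cur acc h
    cases l with
    | nil => simp [PySem.Chars.splitOnMax.go]
    | cons x t =>
      rw [PySem.Chars.splitOnMax.go.eq_def]
      dsimp only
      rw [if_neg (by omega)]
      by_cases hx : c = x
      · subst hx
        rw [if_pos (by simp [List.isPrefixOf])]
        rw [splitGo_m0]
        simp [List.idxOf_cons_self]
      · have hpre : ([c].isPrefixOf (x :: t)) = false := by
          simp [List.isPrefixOf]; exact fun hh => absurd hh hx
        rw [hpre]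
        simp only [Bool.false_eq_true, if_false]
        rw [ih t (x :: cur) acc (by simpa using Nat.lt_of_succ_lt_succ h)]
        by_cases hct : c ∈ t
        · rw [if_pos hct, if_pos (by simp [hct])]
          rw [List.idxOf_cons, Bool.cond_eq_ite, if_neg (by simp [Ne.symm hx])]
          simp
        · rw [if_neg hct, if_neg (by simp [hx, hct])]
          simp

theorem split_two (c : Char) (l : List Char) (hc : c ∈ l) :
    PySem.Chars.splitOnMax l [c] 1 = [l.take (l.idxOf c), l.drop (l.idxOf c + 1)] := by
  rw [PySem.Chars.splitOnMax]
  rw [if_neg (by omega)]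
  have h1 : (1 : Int).toNat = 1 := rfl
  rw [h1, splitGo_one c (l.length + 1) l [] [] (by omega)]
  simp [hc]

theorem contains_hex (ch : Char) :
    PySem.Set.contains (PySem.Set.ofList "0123456789abcdefABCDEF".toList) ch
      = decide (ch ∈ pvHexChars) := by
  rcases h : PySem.Set.contains (PySem.Set.ofList "0123456789abcdefABCDEF".toList) ch with _ | _
  · have hnm : ch ∉ PySem.Set.ofList "0123456789abcdefABCDEF".toList := by
      intro hm
      have := (List.contains_iff_mem).mpr hm
      rw [PySem.Set.contains] at h
      rw [h] at this
      exact absurd this (by simp)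
  -- turn the decide into the membership fact
    rw [PySem.Set.mem_ofList] at hnm
    symm
    rw [decide_eq_false_iff_not]
    simpa [pvHexChars] using hnm
  · have hm : ch ∈ PySem.Set.ofList "0123456789abcdefABCDEF".toList := by
      rw [PySem.Set.contains] at h
      exact List.contains_iff_mem.mp h
    rw [PySem.Set.mem_ofList] at hm
    symm
    rw [decide_eq_true_iff]
    simpa [pvHexChars] using hm

theorem hexPairsGo_eq (h : List Char) :
    hexPairsGo h = ((h.all fun ch => decide (ch ∈ pvHexChars)) && decide (h.length % 2 = 0)) := by
  induction h using hexPairsGo.induct with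
  | case1 => simp [hexPairsGo]
  | case2 c => simp [hexPairsGo]
  | case3 c1 c2 rest hcond =>
    have hpar : ((c1 :: c2 :: rest).length % 2 = 0) ↔ (rest.length % 2 = 0) := by
      simp only [List.length_cons]; omega
    simp only [isIn_singleton] at hcond
    simp only [hexPairsGo, isIn_singleton, hcond, if_true, List.all_cons, hpar]
    rcases Bool.or_eq_true_iff.mp hcond with h1 | h1 <;>
      simp only [Bool.not_eq_true'] at h1 <;> simp [h1]
  | case4 c1 c2 rest hcond ih =>
    have hpar : ((c1 :: c2 :: rest).length % 2 = 0) ↔ (rest.length % 2 = 0) := by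
      simp only [List.length_cons]; omega
    simp only [isIn_singleton] at hcond
    simp only [Bool.not_eq_true] at hcond
    have hcc := Bool.or_eq_false_iff.mp hcond
    have h1 : decide (c1 ∈ pvHexChars) = true := by
      have := hcc.1; simpa using this
    have h2 : decide (c2 ∈ pvHexChars) = true := by
      have := hcc.2; simpa using this
    simp [hexPairsGo, isIn_singleton, ih, h1, h2,
      show (rest.length + 1 + 1) % 2 = 0 ↔ rest.length % 2 = 0 from by omega]

theorem bool_rearrange (x y p q : Bool) : (x && y && p && q) = ((x && p) && (y && q)) := by
  cases x <;> cases y <;> cases p <;> cases q <;> rfl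

-- ===== VERDICT (by name: the statement is the Claim_ definition above) =====
theorem looks_like_hex_pair_spec : Claim_equal_looks_like_hex_pair := by
  intro s _
  unfold Spec_looks_like_hex_pair looks_like_hex_pair looks_like_hex_pair_alt
  simp only [isIn_singleton, find_singleton, PySem.Chars.len_eq]
  generalize PySem.Chars.strip s.toList = t
  by_cases hc : ':' ∈ t
  · rw [if_pos hc, split_two ':' t hc]
    have hj : t.idxOf ':' < t.length := List.idxOf_lt_length_of_mem hc
    simp only [hc, decide_true, Bool.not_true, Bool.false_eq_true, if_false]
    generalize hjd : t.idxOf ':' = j at *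
    have hslice1 : PySem.Chars.slice t none (some (j : Int)) = t.take j := by
      rw [PySem.Chars.slice_eq_listSlice, PySem.List.slice_to_natCast]
    have hslice2 : PySem.Chars.slice t (some ((j : Int) + 1)) none = t.drop (j + 1) := by
      have hcast : ((j : Int) + 1) = ((j + 1 : Nat) : Int) := by push_cast; ring
      rw [hcast, PySem.Chars.slice_eq_listSlice, PySem.List.slice_from_natCast]
    rw [hslice1, hslice2, hexPairsGo_eq, hexPairsGo_eq]
    simp only [contains_hex]
    have hlen1 : (t.take j).length = j := by simp [Nat.le_of_lt hj]
    have hlen2 : (t.drop (j + 1)).length = t.length - (j + 1) := by simp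
    by_cases hj0 : j = 0
    · rw [if_pos (by left; omega)]
      subst hj0
      simp
    · by_cases hje : j + 1 = t.length
      · rw [if_pos (by right; omega)]
        have hd2 : decide (0 < (t.drop (j + 1)).length) = false := by
          rw [hlen2]; simp; omega
        rw [hd2]
        simp
      · rw [if_neg (by omega)]
        have h1 : decide (0 < (t.take j).length) = true := by
          rw [hlen1]; simp; omega
        have h2 : decide (0 < (t.drop (j + 1)).length) = true := by
          rw [hlen2]; simp; omega
        rw [h1, h2]
        simp only [Bool.true_and]
        exact bool_rearrange _ _ _ _
  · rw [if_neg hc]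
    simp only [hc, decide_false, Bool.not_false, if_true]
    rw [if_pos (by left; omega)]
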